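-- pv_equiv track=rewrite | github.com/Zebol/Encoder | main_2.py | encode_val
-- ===== SOURCE A (Python) =====
-- uni_lat = {
--     0: '\x00', 1: '\x01', 2: '\x02', 3: '\x03', 4: '\x04', 5: '\x05', 6: '\x06', 7: '\x07', 8: '\x08', 9: '\t',
--     10: '\n', 11: '\x0b', 12: '\x0c', 13: '\r', 14: '\x0e', 15: '\x0f', 16: '\x10', 17: '\x11', 18: '\x12',
--     19: '\x13', 20: '\x14', 21: '\x15', 22: '\x16', 23: '\x17', 24: '\x18', 25: '\x19', 26: '\x1a',
--     27: '\x1b', 28: '\x1c', 29: '\x1d', 30: '\x1e', 31: '\x1f', 32: ' ', 33: '!', 34: '"', 35: '#', 36: '$',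
--     37: '%', 38: '&', 39: "'", 40: '(', 41: ')', 42: '*', 43: '+', 44: ',', 45: '-', 46: '.', 47: '/',
--     48: '0', 49: '1', 50: '2', 51: '3', 52: '4', 53: '5', 54: '6', 55: '7', 56: '8', 57: '9', 58: ':',
--     59: ';', 60: '<', 61: '=', 62: '>', 63: '?', 64: '@', 65: 'A', 66: 'B', 67: 'C', 68: 'D', 69: 'E',
--     70: 'F', 71: 'G', 72: 'H', 73: 'I', 74: 'J', 75: 'K', 76: 'L', 77: 'M', 78: 'N', 79: 'O', 80: 'P',
--     81: 'Q', 82: 'R', 83: 'S', 84: 'T', 85: 'U', 86: 'V', 87: 'W', 88: 'X', 89: 'Y', 90: 'Z', 91: '[',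
--     92: '\\', 93: ']', 94: '^', 95: '_', 96: '`', 97: 'a', 98: 'b', 99: 'c', 100: 'd', 101: 'e', 102: 'f',
--     103: 'g', 104: 'h', 105: 'i', 106: 'j', 107: 'k', 108: 'l', 109: 'm', 110: 'n', 111: 'o', 112: 'p', 113: 'q',
--     114: 'r', 115: 's', 116: 't', 117: 'u', 118: 'v', 119: 'w', 120: 'x', 121: 'y', 122: 'z', 123: '{',
--     124: '|', 125: '}', 126: '~'}  # латинница с индексами по Unicode
--
-- def encode_val(word):
--     list_code = []
--     lent = len(word)
--     d = uni_lat
--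
--     for w in range(lent):
--         for value in d:
--             if word[w] == d[value]:
--                list_code.append(value)
--     return list_code
-- ===== SOURCE B (Python) =====
-- def encode_val(word):
--     return [ord(c) for c in word if ord(c) < 127]
-- ===== Notes on version B (the rewrite author's own statement) =====
-- stated objective: simpler
-- what changed: Replaces the nested scan over the 127-entry index->char table by a direct per-character ord() computation with a <127 range guard, removing the table and the inner loop.
import Mathlib
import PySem

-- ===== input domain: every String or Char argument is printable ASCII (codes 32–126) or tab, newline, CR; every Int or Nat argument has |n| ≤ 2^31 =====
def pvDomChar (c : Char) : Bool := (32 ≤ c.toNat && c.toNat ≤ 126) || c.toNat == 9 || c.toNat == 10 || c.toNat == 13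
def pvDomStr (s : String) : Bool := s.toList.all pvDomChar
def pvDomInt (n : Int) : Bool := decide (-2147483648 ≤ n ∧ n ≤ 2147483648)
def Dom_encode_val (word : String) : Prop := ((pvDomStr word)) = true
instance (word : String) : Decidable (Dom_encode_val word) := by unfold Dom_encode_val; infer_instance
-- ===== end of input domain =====

-- B replaces A's nested scan over the 127-entry index→char table by a direct per-character code computation with a <127 guard (simpler, no table).


-- ===== PORT A =====
-- the module constant uni_lat: the dict {0:'\x00', 1:'\x01', …, 126:'~'} — key i maps to the char with code i
def uni_lat : List (Int × Char) := (List.range 127).map (fun i => ((i : Int), Char.ofNat i) : Nat → Int × Char)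

def encode_val (word : String) : List Int :=
  let lent : Int := (word.toList.length : Int)
  let d := uni_lat
  (PySem.List.pyRange 0 lent 1).foldl (fun list_code w =>
    d.foldl (fun acc kv =>
      if PySem.List.pyGetD word.toList w ' ' == kv.2 then acc ++ [kv.1] else acc) list_code) []

-- ===== PORT B =====
def encode_val_alt (word : String) : List Int :=
  (word.toList.filter (fun c => c.toNat < 127)).map (fun c => (c.toNat : Int))

-- ===== PRECONDITION & SPEC =====
def Spec_encode_val (word : String) (out : List Int) : Prop := out = encode_val_alt word
instance (word : String) (out : List Int) : Decidable (Spec_encode_val word out) := by unfold Spec_encode_val; infer_instance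

-- ===== CLAIM (what is proved, stated in full; the proofs are below) =====
def Claim_equal_encode_val : Prop := ∀ (word : String), Dom_encode_val word → Spec_encode_val word (encode_val word)

-- ===== LEMMAS AND PROOFS =====

lemma toNat_ofNat_small (i : Nat) (h : i < 127) : (Char.ofNat i).toNat = i := by
  have hv : Nat.isValidChar i := Or.inl (by omega)
  rw [Char.ofNat, dif_pos hv]
  rfl

lemma beq_ofNat_small (c : Char) (i : Nat) (h : i < 127) :
    (c == Char.ofNat i) = (c.toNat == i) := by
  by_cases hc : c = Char.ofNat i
  · subst hc; simp [toNat_ofNat_small i h]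
  · have hne : c.toNat ≠ i := by
      intro he
      exact hc (Char.ext (UInt32.toNat_inj.mp (by rw [← toNat_ofNat_small i h] at he; exact he)))
    simp [hc, hne]

lemma filter_range_beq : ∀ (n m : Nat), m < n →
    (List.range n).filter (fun i => m == i) = [m] := by
  intro n
  induction n with
  | zero => intro m h; omega
  | succ n ih =>
    intro m h
    rw [List.range_succ, List.filter_append]
    by_cases hm : m < n
    · rw [ih m hm]
      have : (m == n) = false := by simp; omega
      simp [this]
    · have hmn : m = n := by omega
      subst hmn
      have hnil : (List.range m).filter (fun i => m == i) = [] := by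
        apply List.filter_eq_nil_iff.mpr
        intro a ha
        simp only [List.mem_range] at ha
        simp
        omega
      simp [hnil]

-- searching A's table for one character with code < 127 appends exactly that code
lemma inner_scan (c : Char) (acc : List Int) (h : c.toNat < 127) :
    uni_lat.foldl (fun a kv => if c == kv.2 then a ++ [kv.1] else a) acc
      = acc ++ [(c.toNat : Int)] := by
  rw [uni_lat, List.foldl_map]
  rw [PySem.List.foldl_append_if (fun i => c == Char.ofNat i) (fun i => (i : Int))]
  rw [List.filter_congr (fun i hi => by
    rw [beq_ofNat_small c i (List.mem_range.mp hi)])]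
  rw [filter_range_beq 127 c.toNat h]
  rfl

-- ===== VERDICT (by name: the statement is the Claim_ definition above) =====
theorem encode_val_spec : Claim_equal_encode_val := by
  intro word hdom
  unfold Spec_encode_val encode_val encode_val_alt
  have hall : ∀ c ∈ word.toList, c.toNat < 127 := by
    intro c hc
    have := List.all_eq_true.mp hdom c hc
    simp only [pvDomChar, Bool.or_eq_true, Bool.and_eq_true, decide_eq_true_eq, beq_iff_eq] at this
    omega
  have h1 := PySem.List.foldl_pyRange_pyGetD' (a := 0) word.toList ' '
      (fun acc c => List.foldl (fun a kv => if c == kv.2 then a ++ [kv.1] else a) acc uni_lat) [] (by omega)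
  simp only [Int.toNat_zero, List.drop_zero] at h1
  rw [h1]
  rw [PySem.List.foldl_congr_mem word.toList _ (fun acc c => acc ++ [((c.toNat : Int))]) []
      (fun acc c hc => inner_scan c acc (hall c hc))]
  rw [PySem.List.foldl_append_singleton_eq_map]
  rw [List.filter_eq_self.mpr (fun c hc => by simp [hall c hc])]
  simp
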